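-- pv_equiv track=rewrite | github.com/bananazzim/ppp-025 | hw10/weather.py | max_rainfalls
-- ===== SOURCE A (Python) =====
-- def max_rainfalls(rainfalls):
--     events = []
--     total_rain = 0
--     for rain in rainfalls:
--         if rain > 0:
--             total_rain += rain
--         else:
--             if total_rain > 0:
--                     events.append(total_rain)
--             total_rain = 0
--     if total_rain > 0:
--         events.append(total_rain)
--
--     return events
-- ===== SOURCE B (Python) =====
-- def max_rainfalls(rainfalls):
--     events = []
--     i = 0
--     n = len(rainfalls)
--     while i < n:
--         if rainfalls[i] > 0:
--             s = rainfalls[i]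
--             j = i + 1
--             while j < n and rainfalls[j] > 0:
--                 s += rainfalls[j]
--                 j += 1
--             events.append(s)
--             i = j
--         else:
--             i += 1
--     return events
-- ===== Notes on version B (the rewrite author's own statement) =====
-- stated objective: alternative
-- what changed: A threads a running accumulator through a single for loop and flushes it at each non-positive element and once after the loop; B scans by index, locating each maximal run of positive values with an inner loop, summing it in place and appending it, so there is no carried accumulator and no post-loop flush.
import Mathlib
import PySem

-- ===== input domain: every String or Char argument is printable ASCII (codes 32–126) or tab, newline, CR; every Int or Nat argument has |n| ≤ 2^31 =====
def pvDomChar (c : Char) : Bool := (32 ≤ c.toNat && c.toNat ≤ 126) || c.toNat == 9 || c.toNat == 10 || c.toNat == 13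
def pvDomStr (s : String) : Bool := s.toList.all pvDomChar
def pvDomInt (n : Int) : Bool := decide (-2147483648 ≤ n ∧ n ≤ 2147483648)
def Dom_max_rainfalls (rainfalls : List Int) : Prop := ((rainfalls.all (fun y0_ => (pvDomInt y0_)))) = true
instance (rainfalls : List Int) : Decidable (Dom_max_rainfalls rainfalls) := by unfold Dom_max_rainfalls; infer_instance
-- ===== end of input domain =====

-- B replaces A's carried accumulator + flush loop with an index/run scan: it finds each
-- maximal positive run, sums it in place, and appends the sum (objective: alternative).

-- ===== PORT A =====
-- the for-loop body: state is (events, total_rain)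
def pvStepA (s : List Int × Int) (rain : Int) : List Int × Int :=
  if 0 < rain then (s.1, s.2 + rain)
  else (if 0 < s.2 then s.1 ++ [s.2] else s.1, 0)

def max_rainfalls (rainfalls : List Int) : List Int :=
  let st := rainfalls.foldl pvStepA ([], 0)
  if 0 < st.2 then st.1 ++ [st.2] else st.1

-- ===== PORT B =====
-- B's outer while loop: a positive element starts a run, summed by the inner loop
-- (takeWhile = the run the inner while consumes, dropWhile = where the index lands).
def max_rainfalls_alt (rainfalls : List Int) : List Int :=
  match rainfalls with
  | [] => []
  | x :: xs =>
    if 0 < x then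
      ((xs.takeWhile (fun y => decide (0 < y))).foldl (· + ·) x)
        :: max_rainfalls_alt (xs.dropWhile (fun y => decide (0 < y)))
    else
      max_rainfalls_alt xs
termination_by rainfalls.length
decreasing_by
  · exact Nat.lt_succ_of_le (List.length_dropWhile_le _ _)
  · exact Nat.lt_succ_of_le (Nat.le_refl _)

-- ===== PRECONDITION & SPEC =====
def Spec_max_rainfalls (rainfalls : List Int) (out : List Int) : Prop := out = max_rainfalls_alt rainfalls
instance (rainfalls : List Int) (out : List Int) : Decidable (Spec_max_rainfalls rainfalls out) := by unfold Spec_max_rainfalls; infer_instance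

-- ===== CLAIM (what is proved, stated in full; the proofs are below) =====
def Claim_equal_max_rainfalls : Prop := ∀ (rainfalls : List Int), Dom_max_rainfalls rainfalls → Spec_max_rainfalls rainfalls (max_rainfalls rainfalls)

-- ===== LEMMAS AND PROOFS =====

-- finish = the post-loop flush of A
def pvFinish (s : List Int × Int) : List Int :=
  if 0 < s.2 then s.1 ++ [s.2] else s.1

-- A's loop started with events = [] and total = t
def pvLoopA (t : Int) (xs : List Int) : List Int :=
  pvFinish (xs.foldl pvStepA ([], t))

-- the events list is only appended to
theorem pvLoopA_events (xs : List Int) : ∀ (e : List Int) (t : Int),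
    pvFinish (xs.foldl pvStepA (e, t)) = e ++ pvLoopA t xs := by
  induction xs with
  | nil =>
    intro e t
    simp only [List.foldl_nil, pvLoopA, pvFinish]
    split <;> simp
  | cons x xs ih =>
    intro e t
    simp only [List.foldl_cons, pvLoopA, pvStepA]
    by_cases hx : 0 < x
    · simp only [if_pos hx]
      exact ih e (t + x)
    · simp only [if_neg hx]
      rw [ih (if 0 < t then e ++ [t] else e) 0,
          ih (if 0 < t then [] ++ [t] else []) 0]
      split <;> simp

-- the key invariant: A's loop from total 0 is B, and from total t > 0 it is
-- (t + the leading positive run) :: B (rest)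
theorem pvLoopA_eq (xs : List Int) :
    pvLoopA 0 xs = max_rainfalls_alt xs ∧
    ∀ t : Int, 0 < t →
      pvLoopA t xs =
        ((xs.takeWhile (fun y => decide (0 < y))).foldl (· + ·) t)
          :: max_rainfalls_alt (xs.dropWhile (fun y => decide (0 < y))) := by
  induction xs with
  | nil =>
    constructor
    · simp [pvLoopA, pvFinish, max_rainfalls_alt]
    · intro t ht
      simp [pvLoopA, pvFinish, ht, max_rainfalls_alt]
  | cons x xs ih =>
    by_cases hx : 0 < x
    · constructor
      · have h1 : pvLoopA 0 (x :: xs) = pvLoopA x xs := by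
          simp [pvLoopA, pvStepA, hx]
        rw [h1, ih.2 x hx, max_rainfalls_alt]
        simp [hx]
      · intro t ht
        have h1 : pvLoopA t (x :: xs) = pvLoopA (t + x) xs := by
          simp [pvLoopA, pvStepA, hx]
        rw [h1, ih.2 (t + x) (by omega)]
        simp [hx]
    · constructor
      · have h1 : pvLoopA 0 (x :: xs) = pvLoopA 0 xs := by
          simp [pvLoopA, pvStepA, hx]
        rw [h1, ih.1, max_rainfalls_alt]
        simp [hx]
      · intro t ht
        have h1 : pvLoopA t (x :: xs) = pvFinish (xs.foldl pvStepA ([t], 0)) := by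
          simp [pvLoopA, pvStepA, hx, ht]
        rw [h1, pvLoopA_events xs [t] 0, ih.1]
        have h2 : max_rainfalls_alt (x :: xs) = max_rainfalls_alt xs := by
          rw [max_rainfalls_alt]; simp [hx]
        simp [hx, h2]

-- ===== VERDICT (by name: the statement is the Claim_ definition above) =====
theorem max_rainfalls_spec : Claim_equal_max_rainfalls := by
  intro rainfalls _
  show max_rainfalls rainfalls = max_rainfalls_alt rainfalls
  have : max_rainfalls rainfalls = pvLoopA 0 rainfalls := rfl
  rw [this, (pvLoopA_eq rainfalls).1]
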